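-- pv_equiv track=rewrite | github.com/wykthor-btracker/PAA---Calculadora | big.py | check
-- ===== SOURCE A (Python) =====
-- def check(str1, str2):
--
--     n1 = len(str1)
--     n2 = len(str2)
--
--     if (n1 < n2):
--         return True
--     if (n2 < n1):
--         return False
--
--     for i in range(n1):
--         if (str1[i] < str2[i]):
--             return True
--         elif (str1[i] > str2[i]):
--             return False
--
--     return False
-- ===== SOURCE B (Python) =====
-- def check(str1, str2):
--     # Single simultaneous pass over both strings (no length computation):
--     # walk both in lockstep, remembering only the FIRST character difference;
--     # whichever string runs out first is smaller, and on simultaneous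
--     # exhaustion the remembered first difference decides (none -> False).
--     it1, it2 = iter(str1), iter(str2)
--     first_diff = None
--     while True:
--         a = next(it1, None)
--         b = next(it2, None)
--         if a is None and b is None:
--             return first_diff is True
--         if a is None:
--             return True
--         if b is None:
--             return False
--         if first_diff is None and a != b:
--             first_diff = a < b
-- ===== Notes on version B (the rewrite author's own statement) =====
-- stated objective: alternative
-- what changed: Instead of A's staged approach (compare lengths first, then a second index loop over the characters), B makes a single simultaneous pass over both strings with iterators and no length computation, carrying a first-difference accumulator: exhaustion order decides the length case and the remembered first difference decides the tie.
import Mathlib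
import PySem

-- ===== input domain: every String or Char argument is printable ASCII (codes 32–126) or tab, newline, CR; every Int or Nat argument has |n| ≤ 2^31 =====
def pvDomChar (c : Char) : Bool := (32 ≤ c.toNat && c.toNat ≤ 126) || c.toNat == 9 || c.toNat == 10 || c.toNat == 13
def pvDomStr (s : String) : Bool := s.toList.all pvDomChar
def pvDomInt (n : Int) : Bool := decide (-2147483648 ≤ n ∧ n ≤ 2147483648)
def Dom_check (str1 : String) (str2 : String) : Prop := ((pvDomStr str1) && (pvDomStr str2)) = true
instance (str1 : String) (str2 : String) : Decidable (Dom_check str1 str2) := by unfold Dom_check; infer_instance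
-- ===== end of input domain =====

-- B replaces A's staged length-comparison-then-index-loop with a single lockstep
-- pass over both strings carrying a first-difference accumulator (alternative,
-- same cost; return value only, no side effects).


-- ===== PORT A =====
-- A's `for i in range(n1)` over the (equal-length) strings, as the obvious
-- structural recursion over the two character lists (same order of comparisons).
def checkLoop (c1 c2 : List Char) : Bool :=
  match c1, c2 with
  | a :: t1, b :: t2 =>
      if a < b then true
      else if b < a then false
      else checkLoop t1 t2
  | _, _ => false

def check (str1 : String) (str2 : String) : Bool :=
  let n1 := str1.toList.length
  let n2 := str2.toList.length
  if n1 < n2 then true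
  else if n2 < n1 then false
  else checkLoop str1.toList str2.toList

-- ===== PORT B =====
-- B's while loop: lockstep consumption of both iterators with the
-- `first_diff : Option Bool` accumulator (none = no difference seen yet).
def goAlt (c1 c2 : List Char) (firstDiff : Option Bool) : Bool :=
  match c1, c2 with
  | [], [] => firstDiff == some true
  | [], _ :: _ => true
  | _ :: _, [] => false
  | a :: t1, b :: t2 =>
      goAlt t1 t2 (if firstDiff == none && a != b then some (decide (a < b)) else firstDiff)

def check_alt (str1 : String) (str2 : String) : Bool :=
  goAlt str1.toList str2.toList none

-- ===== PRECONDITION & SPEC =====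
def Spec_check (str1 : String) (str2 : String) (out : Bool) : Prop := out = check_alt str1 str2
instance (str1 : String) (str2 : String) (out : Bool) : Decidable (Spec_check str1 str2 out) := by unfold Spec_check; infer_instance

-- ===== CLAIM (what is proved, stated in full; the proofs are below) =====
def Claim_equal_check : Prop := ∀ (str1 : String) (str2 : String), Dom_check str1 str2 → Spec_check str1 str2 (check str1 str2)

-- ===== LEMMAS AND PROOFS =====
-- B's loop, characterised against A's pieces.
theorem goAlt_eq (x : List Char) : ∀ (y : List Char) (p : Option Bool),
    goAlt x y p =
      if x.length < y.length then true
      else if y.length < x.length then false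
      else p.getD (checkLoop x y) := by
  induction x with
  | nil =>
      intro y p
      cases y with
      | nil => cases p with
        | none => simp [goAlt, checkLoop]
        | some v => cases v <;> simp [goAlt]
      | cons b t => simp [goAlt]
  | cons a t1 ih =>
      intro y p
      cases y with
      | nil => simp [goAlt]
      | cons b t2 =>
          simp only [goAlt, ih, List.length_cons]
          by_cases h1 : t1.length < t2.length
          · simp [h1, Nat.succ_lt_succ h1]
          · by_cases h2 : t2.length < t1.length
            · simp [h1, h2, Nat.succ_lt_succ h2]
            · have e1 : ¬ (t1.length + 1 < t2.length + 1) := by omega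
              have e2 : ¬ (t2.length + 1 < t1.length + 1) := by omega
              simp only [h1, h2, e1, e2, if_false]
              cases p with
              | some v => simp
              | none =>
                  by_cases hab : a = b
                  · subst hab; simp [checkLoop]
                  · rcases lt_or_gt_of_ne hab with h | h
                    · simp [checkLoop, hab, h]
                    · simp [checkLoop, hab, h, not_lt_of_gt h]

-- ===== VERDICT (by name: the statement is the Claim_ definition above) =====
theorem check_spec : Claim_equal_check := by
  intro str1 str2 _
  unfold Spec_check check check_alt
  rw [goAlt_eq]
  by_cases h1 : str1.toList.length < str2.toList.length
  · simp [h1]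
  · by_cases h2 : str2.toList.length < str1.toList.length
    · simp [h2]
    · simp [h1, h2]
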